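-- pv_equiv track=rewrite | github.com/allenai/mmda | mmda/predictors/hf_predictors/utils.py | convert_sequence_tagging_to_spans
-- ===== SOURCE A (Python) =====
-- from typing import List, Tuple, Dict
-- import itertools
--
-- def convert_sequence_tagging_to_spans(
--     token_prediction_sequence: List,
-- ) -> List[Tuple[int, int, int]]:
--     """For a sequence of token predictions, convert them to spans
--     of consecutive same predictions.
--
--     Args:
--         token_prediction_sequence (List)
--
--     Returns:
--         List[Tuple[int, int, int]]: A list of (start, end, label)
--             of consecutive prediction of the same label.
--     """
--     prev_len = 0
--     spans = []
--     for gp, seq in itertools.groupby(token_prediction_sequence):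
--         cur_len = len(list(seq))
--         spans.append((prev_len, prev_len + cur_len, gp))
--         prev_len = prev_len + cur_len
--     return spans
-- ===== SOURCE B (Python) =====
-- def _join(left, right):
--     # merge span lists of adjacent blocks: fuse the boundary spans if same label
--     (ls, _le, ll) = left[-1]
--     (_rs, re, rl) = right[0]
--     if ll == rl:
--         return left[:-1] + [(ls, re, ll)] + right[1:]
--     return left + right
--
--
-- def _solve(seq, off):
--     # span list of a nonempty block seq whose first token has global index off
--     n = len(seq)
--     if n == 1:
--         return [(off, off + 1, seq[0])]
--     mid = n // 2
--     return _join(_solve(seq[:mid], off), _solve(seq[mid:], off + mid))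
--
--
-- def convert_sequence_tagging_to_spans(token_prediction_sequence):
--     if not token_prediction_sequence:
--         return []
--     return _solve(token_prediction_sequence, 0)
-- ===== Notes on version B (the rewrite author's own statement) =====
-- stated objective: alternative
-- what changed: Replaces the linear groupby scan with running length by a divide-and-conquer recursion: split the sequence in half, recursively compute span lists for each half, and merge them by fusing the two boundary spans when their labels agree.
import Mathlib
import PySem

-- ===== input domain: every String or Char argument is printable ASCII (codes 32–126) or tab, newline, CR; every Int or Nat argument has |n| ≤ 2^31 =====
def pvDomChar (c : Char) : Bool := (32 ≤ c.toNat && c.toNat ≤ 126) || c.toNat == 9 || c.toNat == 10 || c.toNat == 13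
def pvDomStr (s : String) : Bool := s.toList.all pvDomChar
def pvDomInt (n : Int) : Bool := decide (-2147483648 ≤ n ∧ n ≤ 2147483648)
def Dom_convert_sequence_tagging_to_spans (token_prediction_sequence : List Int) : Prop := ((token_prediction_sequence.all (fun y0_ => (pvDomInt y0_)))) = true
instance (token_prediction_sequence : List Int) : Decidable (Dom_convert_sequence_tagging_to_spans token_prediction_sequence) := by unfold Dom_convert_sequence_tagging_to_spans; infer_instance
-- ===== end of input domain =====

-- B replaces A's groupby scan by a divide-and-conquer recursion: split the sequence in
-- half, recurse on both halves, and merge the two span lists by fusing the boundary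
-- spans when their labels agree (objective: alternative algorithm, not faster).


-- ===== PORT A =====
-- itertools.groupby over an Int list: (key, group) pairs of maximal runs
def pyGroupby (l : List Int) : List (Int × List Int) :=
  match l with
  | [] => []
  | a :: rest =>
    (a, a :: rest.takeWhile (· == a)) :: pyGroupby (rest.dropWhile (· == a))
termination_by l.length
decreasing_by
  simp only [List.length_cons]
  exact Nat.lt_succ_of_le (List.length_dropWhile_le _ _)

-- the for-loop of A: running prev_len, appending (prev, prev+len, gp)
def goA : List (Int × List Int) → Int → List (Int × Int × Int)
  | [], _ => []
  | (gp, seq) :: rest, prev =>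
    (prev, prev + (seq.length : Int), gp) :: goA rest (prev + (seq.length : Int))

def convert_sequence_tagging_to_spans (token_prediction_sequence : List Int) : List (Int × Int × Int) :=
  goA (pyGroupby token_prediction_sequence) 0

-- ===== PORT B =====
-- Source B's _join: merge span lists of adjacent blocks, fusing the boundary spans if same label.
-- (_join is only ever called on nonempty lists; the fallthrough arm is unreachable.)
def joinAt (left right : List (Int × Int × Int)) : List (Int × Int × Int) :=
  match left.getLast?, right.head? with
  | some (ls, _, ll), some (_, re, rl) =>
    if ll = rl then left.dropLast ++ [(ls, re, ll)] ++ right.tail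
    else left ++ right
  | _, _ => left ++ right

-- Source B's _solve: span list of a nonempty block whose first token has global index off.
-- (_solve is only ever called on nonempty blocks; the [] arm is unreachable.  The fuel
-- parameter only makes the halving recursion structural: it starts at the block length
-- and each call halves the block, so the 0-fuel arm is never reached.)
def solveB : Nat → List Int → Int → List (Int × Int × Int)
  | 0, _, _ => []
  | _ + 1, [], _ => []
  | _ + 1, [x], off => [(off, off + 1, x)]
  | fuel + 1, x :: y :: t, off =>
    let mid := (x :: y :: t).length / 2
    joinAt (solveB fuel ((x :: y :: t).take mid) off)
           (solveB fuel ((x :: y :: t).drop mid) (off + (mid : Int)))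

def convert_sequence_tagging_to_spans_alt (token_prediction_sequence : List Int) : List (Int × Int × Int) :=
  match token_prediction_sequence with
  | [] => []
  | x :: t => solveB (x :: t).length (x :: t) 0

-- ===== PRECONDITION & SPEC =====
def Spec_convert_sequence_tagging_to_spans (token_prediction_sequence : List Int) (out : List (Int × Int × Int)) : Prop := out = convert_sequence_tagging_to_spans_alt token_prediction_sequence
instance (token_prediction_sequence : List Int) (out : List (Int × Int × Int)) : Decidable (Spec_convert_sequence_tagging_to_spans token_prediction_sequence out) := by unfold Spec_convert_sequence_tagging_to_spans; infer_instance

-- ===== CLAIM (what is proved, stated in full; the proofs are below) =====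
def Claim_equal_convert_sequence_tagging_to_spans : Prop := ∀ (token_prediction_sequence : List Int), Dom_convert_sequence_tagging_to_spans token_prediction_sequence → Spec_convert_sequence_tagging_to_spans token_prediction_sequence (convert_sequence_tagging_to_spans token_prediction_sequence)

-- ===== LEMMAS AND PROOFS =====

-- A's result as a function of the input suffix and the running offset
def Rsp (l : List Int) (off : Int) : List (Int × Int × Int) := goA (pyGroupby l) off

theorem Rsp_nil (off : Int) : Rsp [] off = [] := by
  simp [Rsp, pyGroupby, goA]

theorem Rsp_cons (a : Int) (t : List Int) (off : Int) :
    Rsp (a :: t) off =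
      (off, off + (((t.takeWhile (· == a)).length : Int) + 1), a)
        :: Rsp (t.dropWhile (· == a)) (off + (((t.takeWhile (· == a)).length : Int) + 1)) := by
  rw [Rsp, pyGroupby, goA, Rsp]
  simp only [List.length_cons]
  push_cast
  ring_nf

theorem Rsp_ne_nil (a : Int) (t : List Int) (off : Int) : Rsp (a :: t) off ≠ [] := by
  rw [Rsp_cons]; simp

theorem takeWhile_all_append (a : Int) (g r : List Int) (hg : ∀ b ∈ g, b = a) :
    (g ++ r).takeWhile (· == a) = g ++ r.takeWhile (· == a) ∧
    (g ++ r).dropWhile (· == a) = r.dropWhile (· == a) := by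
  induction g with
  | nil => simp
  | cons c g ih =>
    have hc : c = a := hg c (by simp)
    have := ih (fun b hb => hg b (by simp [hb]))
    simp [hc, this.1, this.2]

theorem takeWhile_head_ne (a b : Int) (r z : List Int) (hb : b ≠ a) :
    ((b :: r) ++ z).takeWhile (· == a) = [] ∧ ((b :: r) ++ z).dropWhile (· == a) = (b :: r) ++ z := by
  simp [hb]

theorem joinAt_cons (p : Int × Int × Int) (L R : List (Int × Int × Int)) (hL : L ≠ []) :
    joinAt (p :: L) R = p :: joinAt L R := by
  obtain ⟨q, L', rfl⟩ := List.exists_cons_of_ne_nil hL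
  unfold joinAt
  cases hR : R.head? with
  | none => simp
  | some pr =>
    obtain ⟨rs, re, rl⟩ := pr
    have hlast : (p :: q :: L').getLast? = (q :: L').getLast? := List.getLast?_cons_cons ..
    rw [hlast]
    cases hl : (q :: L').getLast? with
    | none => simp at hl
    | some pl =>
      obtain ⟨ls, le, ll⟩ := pl
      by_cases h : ll = rl <;> simp [h, List.dropLast_cons_of_ne_nil]

-- A's spans of a concatenation are the boundary-merge of the spans of the pieces
theorem Rsp_append : ∀ (n : Nat) (l1 : List Int), l1.length ≤ n → ∀ (l2 : List Int) (off : Int), l1 ≠ [] → l2 ≠ [] →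
    Rsp (l1 ++ l2) off = joinAt (Rsp l1 off) (Rsp l2 (off + (l1.length : Int))) := by
  intro n
  induction n with
  | zero =>
    intro l1 h1 l2 off hne _
    cases l1 with
    | nil => exact absurd rfl hne
    | cons a t => simp at h1
  | succ n ih =>
    intro l1 h1 l2 off hne hne2
    obtain ⟨a, t1, rfl⟩ := List.exists_cons_of_ne_nil hne
    set g := t1.takeWhile (· == a) with hgdef
    set r := t1.dropWhile (· == a) with hrdef
    have hg : ∀ b ∈ g, b = a := by
      intro b hb
      rw [hgdef] at hb
      simpa using List.mem_takeWhile_imp hb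
    have hsplit : g ++ r = t1 := List.takeWhile_append_dropWhile
    have hlen1 : ((a :: t1).length : Int) = (g.length : Int) + 1 + (r.length : Int) := by
      rw [← hsplit]
      simp only [List.length_cons, List.length_append]
      push_cast
      ring
    cases hr : r with
    | nil =>
      -- l1 is a single run of a
      have ht1 : t1 = g := by rw [← hsplit, hr, List.append_nil]
      have hR1 : Rsp (a :: t1) off = [(off, off + ((g.length : Int) + 1), a)] := by
        rw [Rsp_cons, ← hgdef, ← hrdef, hr, Rsp_nil]
      obtain ⟨b, t2, rfl⟩ := List.exists_cons_of_ne_nil hne2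
      by_cases hb : b = a
      · -- the run continues into l2
        rw [hb]
        have htw : (t1 ++ a :: t2).takeWhile (· == a) = g ++ a :: t2.takeWhile (· == a) ∧
                   (t1 ++ a :: t2).dropWhile (· == a) = t2.dropWhile (· == a) := by
          rw [ht1]
          have h0 := takeWhile_all_append a g (a :: t2) hg
          simpa [List.takeWhile_cons, List.dropWhile_cons] using h0
        rw [show (a :: t1) ++ a :: t2 = a :: (t1 ++ a :: t2) from rfl]
        rw [Rsp_cons a (t1 ++ a :: t2), htw.1, htw.2, hR1, Rsp_cons a t2]
        unfold joinAt
        simp only [List.getLast?_singleton, List.head?_cons, List.dropLast_singleton,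
          List.nil_append, List.tail_cons, List.singleton_append]
        have e : ((g ++ a :: t2.takeWhile (· == a)).length : Int) + 1
            = ((a :: t1).length : Int) + (((t2.takeWhile (· == a)).length : Int) + 1) := by
          rw [ht1]
          push_cast [List.length_append, List.length_cons]
          ring
        rw [e, ← add_assoc]
        simp
      · -- labels differ at the boundary: the span lists just concatenate
        have htw : (t1 ++ b :: t2).takeWhile (· == a) = g ∧
                   (t1 ++ b :: t2).dropWhile (· == a) = b :: t2 := by
          rw [ht1]
          have h0 := takeWhile_all_append a g (b :: t2) hg
          simpa [List.takeWhile_cons, hb] using h0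
        rw [show (a :: t1) ++ b :: t2 = a :: (t1 ++ b :: t2) from rfl]
        rw [Rsp_cons a (t1 ++ b :: t2), htw.1, htw.2, hR1, Rsp_cons b t2, Rsp_cons b t2]
        unfold joinAt
        simp only [List.getLast?_singleton, List.head?_cons, List.singleton_append]
        rw [if_neg (show ¬ a = b from fun h => hb (Eq.symm h))]
        have e : (g.length : Int) + 1 = ((a :: t1).length : Int) := by
          rw [ht1]
          push_cast [List.length_cons]
          ring
        rw [e]
    | cons c r' =>
      -- the head's maximal run ends inside l1: peel it and use the IH on the rest
      have hrne : t1.dropWhile (· == a) ≠ [] := by rw [← hrdef, hr]; simp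
      have hc' : c ≠ a := by
        have h0 := List.head_dropWhile_not (· == a) (l := t1) hrne
        simp only [← hrdef, hr, List.head_cons] at h0
        simpa using h0
      have htw : (t1 ++ l2).takeWhile (· == a) = g ∧
                 (t1 ++ l2).dropWhile (· == a) = r ++ l2 := by
        rw [← hsplit, hr, List.append_assoc]
        have h1' := takeWhile_all_append a g ((c :: r') ++ l2) hg
        have h2' := takeWhile_head_ne a c r' l2 hc'
        exact ⟨by rw [h1'.1, h2'.1, List.append_nil], by rw [h1'.2, h2'.2]⟩
      have hrlen : r.length ≤ n := by
        have hd := List.length_dropWhile_le (· == a) t1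
        rw [← hrdef] at hd
        simp only [List.length_cons] at h1
        omega
      rw [show (a :: t1) ++ l2 = a :: (t1 ++ l2) from rfl]
      rw [Rsp_cons a (t1 ++ l2), htw.1, htw.2, hr]
      rw [ih (c :: r') (hr ▸ hrlen) l2 _ (by simp) hne2]
      rw [Rsp_cons a t1, ← hgdef, ← hrdef, hr]
      rw [joinAt_cons _ _ _ (Rsp_ne_nil c r' _)]
      have e : off + ((g.length : Int) + 1) + (((c :: r').length : Nat) : Int)
          = off + (((a :: t1).length : Nat) : Int) := by
        rw [hlen1, hr]
        push_cast [List.length_cons]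
        ring
      rw [e]

theorem solveB_eq_Rsp : ∀ (n : Nat) (l : List Int), l.length ≤ n → l ≠ [] →
    ∀ (off : Int), solveB n l off = Rsp l off := by
  intro n
  induction n with
  | zero =>
    intro l hl hne off
    cases l with
    | nil => exact absurd rfl hne
    | cons a t => simp at hl
  | succ n ih =>
    intro l hl hne off
    match l with
    | [x] =>
      rw [solveB, Rsp_cons]
      simp [Rsp_nil]
    | x :: y :: t =>
      rw [solveB]
      have hlen : (x :: y :: t).length = t.length + 2 := by simp
      set m := (x :: y :: t).length / 2 with hm
      have hm1 : 1 ≤ m := by rw [hm, hlen]; omega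
      have hm2 : m < t.length + 2 := by rw [hm, hlen]; omega
      have htake : ((x :: y :: t).take m).length = m := by
        simp [List.length_take]; omega
      have hdrop : ((x :: y :: t).drop m).length = t.length + 2 - m := by
        simp [List.length_drop]
      have htne : (x :: y :: t).take m ≠ [] := by
        intro h; rw [h] at htake; simp at htake; omega
      have hdne : (x :: y :: t).drop m ≠ [] := by
        intro h; rw [h] at hdrop; simp at hdrop; omega
      rw [ih _ (by rw [htake]; simp at hl; omega) htne,
          ih _ (by rw [hdrop]; simp at hl; omega) hdne]
      rw [show ((m : Nat) : Int) = (((x :: y :: t).take m).length : Int) from by rw [htake]]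
      rw [← Rsp_append ((x :: y :: t).take m).length _ le_rfl _ off htne hdne,
          List.take_append_drop]

-- ===== VERDICT (by name: the statement is the Claim_ definition above) =====
theorem convert_sequence_tagging_to_spans_spec : Claim_equal_convert_sequence_tagging_to_spans := by
  intro l _
  unfold Spec_convert_sequence_tagging_to_spans
  cases l with
  | nil => simp [convert_sequence_tagging_to_spans, convert_sequence_tagging_to_spans_alt, pyGroupby, goA]
  | cons a t =>
    show Rsp (a :: t) 0 = convert_sequence_tagging_to_spans_alt (a :: t)
    rw [convert_sequence_tagging_to_spans_alt, solveB_eq_Rsp (a :: t).length (a :: t) le_rfl (by simp)]
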